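-- pv_equiv track=rewrite | github.com/oleorhagen/mender-python-client | src/mender/client/deployments.py | get_exponential_backoff_time
-- ===== SOURCE A (Python) =====
-- DOWNLOAD_RESUME_MIN_INTERVAL = 60
--
-- class DeploymentDownloadFailed(Exception):
--     pass
--
-- def get_exponential_backoff_time(tried: int, max_interval: int) -> int:
--     per_internal_attempts = 3
--     smallest_unit = DOWNLOAD_RESUME_MIN_INTERVAL
--
--     interval = smallest_unit
--     next_interval = interval
--     for count in range(0, tried + 1, per_internal_attempts):
--         interval = next_interval
--         next_interval *= 2
--         if interval >= max_interval:
--             if tried - count >= per_internal_attempts: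
--                 raise DeploymentDownloadFailed(
--                     f"Max tries exceeded: tries {tried} max_interval {max_interval}"
--                 )
--             if max_interval < smallest_unit:
--                 return smallest_unit
--             return max_interval
--
--     return interval
-- ===== SOURCE B (Python) =====
-- DOWNLOAD_RESUME_MIN_INTERVAL = 60
--
--
-- class DeploymentDownloadFailed(Exception):
--     pass
--
--
-- def get_exponential_backoff_time(tried: int, max_interval: int) -> int:
--     # closed form: i0 = smallest i with 60 * 2**i >= max_interval
--     i0 = 0
--     v = DOWNLOAD_RESUME_MIN_INTERVAL
--     while v < max_interval:
--         v *= 2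
--         i0 += 1
--     if tried < 0:
--         return DOWNLOAD_RESUME_MIN_INTERVAL
--     if tried < 3 * i0:
--         return DOWNLOAD_RESUME_MIN_INTERVAL * 2 ** (tried // 3)
--     if tried - 3 * i0 >= 3:
--         raise DeploymentDownloadFailed(
--             f"Max tries exceeded: tries {tried} max_interval {max_interval}"
--         )
--     if max_interval < DOWNLOAD_RESUME_MIN_INTERVAL:
--         return DOWNLOAD_RESUME_MIN_INTERVAL
--     return max_interval
-- ===== Notes on version B (the rewrite author's own statement) =====
-- stated objective: simpler
-- what changed: Replaces A's doubling loop over range(0, tried+1, 3) (with early return/raise inside) by a closed-form case split on i0, the smallest i with 60*2**i >= max_interval, computed by a short integer-doubling loop independent of tried.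
import Mathlib
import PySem

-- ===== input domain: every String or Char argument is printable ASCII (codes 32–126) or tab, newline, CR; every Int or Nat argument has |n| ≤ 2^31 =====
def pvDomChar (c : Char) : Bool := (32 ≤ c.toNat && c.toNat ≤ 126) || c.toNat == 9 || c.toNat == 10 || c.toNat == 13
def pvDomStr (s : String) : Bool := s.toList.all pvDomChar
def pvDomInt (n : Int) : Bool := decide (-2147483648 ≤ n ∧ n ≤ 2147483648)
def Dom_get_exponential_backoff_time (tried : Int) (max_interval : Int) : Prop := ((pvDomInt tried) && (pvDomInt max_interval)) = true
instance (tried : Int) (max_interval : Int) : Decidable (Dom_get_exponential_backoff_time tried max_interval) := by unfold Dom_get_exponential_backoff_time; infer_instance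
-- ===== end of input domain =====

-- B replaces A's doubling loop over range(0, tried+1, 3) by a closed-form case split on
-- i0 = the smallest i with 60*2^i >= max_interval (objective: simpler; both Pythons raise
-- DeploymentDownloadFailed on the same inputs, excluded by Pre_; the ports return 0 there).

-- ===== PORT A =====
-- the for-loop of A over range(0, tried + 1, 3); state = (interval, next_interval);
-- the 'raise DeploymentDownloadFailed' returns 0 (those inputs are outside Pre_)
def goA (tried mi : Int) : List Int → Int → Int → Int
  | [], interval, _ => interval
  | c :: rest, _, next_interval =>
      if next_interval ≥ mi then
        if tried - c ≥ 3 then 0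
        else if mi < 60 then 60
        else mi
      else goA tried mi rest next_interval (next_interval * 2)

def get_exponential_backoff_time (tried : Int) (max_interval : Int) : Int :=
  goA tried max_interval (PySem.List.pyRange 0 (tried + 1) 3) 60 60

-- ===== PORT B =====
-- Source B's while loop computing i0 (the extra 'v ≠ 0' conjunct only makes termination provable;
-- it is always true on Source B's actual calls, which start at v = 60)
def pvI0 (m : Int) (v : Nat) : Nat :=
  if h : (v : Int) < m ∧ v ≠ 0 then pvI0 m (2 * v) + 1 else 0
termination_by (m - (v : Int)).toNat
decreasing_by
  have h1 : 1 ≤ (v : Int) := by exact_mod_cast Nat.one_le_iff_ne_zero.mpr h.2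
  omega

def get_exponential_backoff_time_alt (tried : Int) (max_interval : Int) : Int :=
  let i0 : Int := (pvI0 max_interval 60 : Int)
  if tried < 0 then 60
  else if tried < 3 * i0 then 60 * 2 ^ ((PySem.Int.floordiv tried 3).toNat)
  else if tried - 3 * i0 ≥ 3 then 0  -- Python raises DeploymentDownloadFailed here (outside Pre_)
  else if max_interval < 60 then 60
  else max_interval

-- ===== PRECONDITION & SPEC =====
-- Pre_ excludes exactly the inputs on which the Python A (and B alike) raises
-- DeploymentDownloadFailed: tried ≥ 3 and max_interval ≤ 60 * 2^((tried-3)/3).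
def Pre_get_exponential_backoff_time (tried : Int) (max_interval : Int) : Prop :=
  tried < 3 ∨ 60 * 2 ^ (((tried - 3) / 3).toNat) < max_interval

instance (tried : Int) (max_interval : Int) : Decidable (Pre_get_exponential_backoff_time tried max_interval) := by
  unfold Pre_get_exponential_backoff_time; infer_instance

def pvWitness_get_exponential_backoff_time : Int × Int := (4, 1000)

def Spec_get_exponential_backoff_time (tried : Int) (max_interval : Int) (out : Int) : Prop := out = get_exponential_backoff_time_alt tried max_interval
instance (tried : Int) (max_interval : Int) (out : Int) : Decidable (Spec_get_exponential_backoff_time tried max_interval out) := by unfold Spec_get_exponential_backoff_time; infer_instance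

-- ===== CLAIM (what is proved, stated in full; the proofs are below) =====
def Claim_equal_get_exponential_backoff_time : Prop := ∀ (tried : Int) (max_interval : Int), Dom_get_exponential_backoff_time tried max_interval → Pre_get_exponential_backoff_time tried max_interval → Spec_get_exponential_backoff_time tried max_interval (get_exponential_backoff_time tried max_interval)

-- ===== LEMMAS AND PROOFS =====

-- pvI0 m v is the smallest k with v * 2^k ≥ m (for v ≠ 0)
lemma pvI0_le_iff (m : Int) : ∀ (k : Nat) (v : Nat), v ≠ 0 → (pvI0 m v ≤ k ↔ m ≤ (v : Int) * 2 ^ k) := by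
  intro k
  induction k with
  | zero =>
    intro v hv
    rw [pvI0]
    split_ifs with h
    · simp only [pow_zero, mul_one]
      constructor
      · intro hle; omega
      · intro hm; exact absurd h.1 (by omega)
    · have hnm : ¬ (v : Int) < m := fun hlt => h ⟨hlt, hv⟩
      simp only [pow_zero, mul_one]
      omega
  | succ s IH =>
    intro v hv
    rw [pvI0]
    split_ifs with h
    · have h2 : (2 * v) ≠ 0 := by omega
      have hcast : (v : Int) * 2 ^ (s + 1) = ((2 * v : Nat) : Int) * 2 ^ s := by push_cast; ring
      rw [hcast]
      rw [← IH (2 * v) h2]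
      omega
    · have hnm : ¬ (v : Int) < m := fun hlt => h ⟨hlt, hv⟩
      have h1 : 1 ≤ (v : Int) := by exact_mod_cast Nat.one_le_iff_ne_zero.mpr hv
      have hp : (1 : Int) ≤ 2 ^ (s + 1) := one_le_pow₀ (by norm_num)
      have : (v : Int) * 1 ≤ (v : Int) * 2 ^ (s + 1) := by
        apply mul_le_mul_of_nonneg_left hp (by omega)
      simp only [mul_one] at this
      constructor
      · intro _; omega
      · intro _; omega

-- the loop of A, run on counts 3*j, 3*(j+1), …: closed-form outcome
lemma goA_run (mi tried : Int) (k0 : Nat)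
    (HK : ∀ k : Nat, k0 ≤ k ↔ mi ≤ 60 * 2 ^ k) :
    ∀ (r j : Nat) (i : Int), j ≤ k0 → tried < 3 * (j : Int) + 3 * (r : Int) →
    goA tried mi ((List.range r).map (fun k : Nat => 3 * ((j : Int) + (k : Int)))) i (60 * 2 ^ j) =
      if r = 0 then i
      else if k0 < j + r then
        (if tried - 3 * (k0 : Int) ≥ 3 then 0 else if mi < 60 then 60 else mi)
      else 60 * 2 ^ (j + r - 1) := by
  intro r
  induction r with
  | zero => intro j i _ _; simp [goA]
  | succ s IH =>
    intro j i hj hb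
    rw [List.range_succ_eq_map]
    simp only [List.map_cons, List.map_map, Nat.cast_zero, add_zero]
    rw [goA]
    by_cases htr : 60 * 2 ^ j ≥ mi
    · -- trigger fires here: k0 ≤ j, so j = k0
      have hk0j : k0 ≤ j := (HK j).mpr htr
      have hjk0 : j = k0 := le_antisymm hj hk0j
      rw [if_pos htr]
      have hcond : k0 < j + (s + 1) := by omega
      simp only [Nat.succ_ne_zero, hjk0]
      simp
    · rw [if_neg htr]
      have hjk : j + 1 ≤ k0 := by
        by_contra hc
        exact htr ((HK j).mp (by omega))
      have hmap : ((List.range s).map ((fun k : Nat => 3 * ((j : Int) + (k : Int))) ∘ (fun n => n + 1)))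
          = (List.range s).map (fun k : Nat => 3 * (((j + 1 : Nat) : Int) + (k : Int))) := by
        apply List.map_congr_left
        intro x _
        simp only [Function.comp]
        push_cast; ring
      rw [hmap]
      have hIH := IH (j + 1) (60 * 2 ^ j) hjk (by push_cast at hb ⊢; omega)
      rw [show (60 : Int) * 2 ^ (j + 1) = 60 * 2 ^ j * 2 from by ring] at hIH
      rw [hIH]
      by_cases hs : s = 0
      · subst hs
        have : ¬ k0 < j + 1 := by omega
        simp [this]
      · have hiff : (k0 < (j + 1) + s) ↔ (k0 < j + (s + 1)) := by omega
        have hexp : (j + 1) + s - 1 = j + (s + 1) - 1 := by omega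
        simp only [hs, Nat.succ_ne_zero, hexp]
        split_ifs with h1 h2 <;> simp_all

-- ===== VERDICT (by name: the statement is the Claim_ definition above) =====
theorem get_exponential_backoff_time_spec : Claim_equal_get_exponential_backoff_time := by
  intro tried mi _ hpre
  unfold Spec_get_exponential_backoff_time
  simp only [get_exponential_backoff_time, get_exponential_backoff_time_alt]
  set k0 : Nat := pvI0 mi 60 with hk0def
  have HK : ∀ k : Nat, k0 ≤ k ↔ mi ≤ 60 * 2 ^ k := by
    intro k
    have := pvI0_le_iff mi k 60 (by norm_num)
    simpa using this
  rw [PySem.Int.floordiv_eq_ediv_of_pos (by norm_num : (0:Int) < 3)]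
  by_cases ht : tried < 0
  · have hempty : PySem.List.pyRange 0 (tried + 1) 3 = [] := by
      rw [PySem.List.pyRange_of_pos _ _ (by norm_num)]
      have : ¬ (0 : Int) < tried + 1 := by omega
      simp [this]
    rw [hempty]
    simp [goA, ht]
  · rw [not_lt] at ht
    have hlist : PySem.List.pyRange 0 (tried + 1) 3
        = (List.range ((tried / 3).toNat + 1)).map (fun k : Nat => 3 * (k : Int)) := by
      rw [PySem.List.pyRange_of_pos _ _ (by norm_num)]
      have hpos : (0 : Int) < tried + 1 := by omega
      rw [if_pos hpos]
      have harg : ((tried + 1 - 0 + 3 - 1) / 3).toNat = (tried / 3).toNat + 1 := by omega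
      rw [harg]
      apply List.map_congr_left
      intro x _; ring
    rw [hlist]
    have hrun := goA_run mi tried k0 HK ((tried / 3).toNat + 1) 0 60 (Nat.zero_le _) (by push_cast; omega)
    norm_num at hrun
    rw [hrun]
    -- the raise case is excluded by Pre_
    have hnoraise : ¬ (3 ≤ tried - 3 * (k0 : Int)) := by
      intro hraise
      rcases hpre with h3 | hlt
      · omega
      · have hk0le : k0 ≤ ((tried - 3) / 3).toNat := by
          by_contra hc
          have := (HK ((tried - 3) / 3).toNat).mp (by omega)
          omega
        have : mi ≤ 60 * 2 ^ (((tried - 3) / 3).toNat) := (HK _).mp hk0le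
        omega
    split_ifs <;> first | rfl | omega
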